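-- pv_equiv track=rewrite | github.com/cantdoitbye/backend | generate_api_docs.py | extract_purpose_from_name
-- ===== SOURCE A (Python) =====
-- def extract_purpose_from_name(name):
--     """Generate purpose description from API name"""
--     # Common patterns and their meanings
--     purposes = {
--         'create_': 'Creates a new {}',
--         'update_': 'Updates an existing {}',
--         'delete_': 'Deletes/removes {}',
--         'get_': 'Retrieves {}',
--         'list_': 'Lists all {}',
--         'send_': 'Sends {}',
--         'add_': 'Adds {} to collection',
--         'remove_': 'Removes {} from collection',
--         'join_': 'Joins {}',
--         'leave_': 'Leaves {}',
--         'accept_': 'Accepts {}',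
--         'reject_': 'Rejects {}',
--         'ban_': 'Bans user from {}',
--         'unban_': 'Unbans user from {}',
--         'mute_': 'Mutes {}',
--         'unmute_': 'Unmutes {}',
--         'pin_': 'Pins {} for highlighting',
--         'unpin_': 'Unpins {}',
--         'save_': 'Saves {} to collection',
--         'unsave_': 'Removes {} from saved items',
--         'share_': 'Shares {} with others',
--         'view_': 'Records view activity for {}',
--         'search_': 'Searches for {}',
--         'filter_': 'Filters {} by criteria',
--         'my_': 'Retrieves current user\'s {}'
--     }
--
--     for prefix, template in purposes.items():
--         if name.startswith(prefix):
--             entity = name[len(prefix):].replace('_', ' ')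
--             return template.format(entity)
--
--     # Default fallback
--     return f"Handles {name.replace('_', ' ')} operations"
-- ===== SOURCE B (Python) =====
-- _SEGMENTS = {
--     'create': ('Creates a new ', ''),
--     'update': ('Updates an existing ', ''),
--     'delete': ('Deletes/removes ', ''),
--     'get': ('Retrieves ', ''),
--     'list': ('Lists all ', ''),
--     'send': ('Sends ', ''),
--     'add': ('Adds ', ' to collection'),
--     'remove': ('Removes ', ' from collection'),
--     'join': ('Joins ', ''),
--     'leave': ('Leaves ', ''),
--     'accept': ('Accepts ', ''),
--     'reject': ('Rejects ', ''),
--     'ban': ('Bans user from ', ''),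
--     'unban': ('Unbans user from ', ''),
--     'mute': ('Mutes ', ''),
--     'unmute': ('Unmutes ', ''),
--     'pin': ('Pins ', ' for highlighting'),
--     'unpin': ('Unpins ', ''),
--     'save': ('Saves ', ' to collection'),
--     'unsave': ('Removes ', ' from saved items'),
--     'share': ('Shares ', ' with others'),
--     'view': ('Records view activity for ', ''),
--     'search': ('Searches for ', ''),
--     'filter': ('Filters ', ' by criteria'),
--     'my': ("Retrieves current user's ", ''),
-- }
--
--
-- def extract_purpose_from_name(name):
--     """Generate purpose description from API name"""
--     head, sep, tail = name.partition('_')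
--     if sep:
--         segs = _SEGMENTS.get(head)
--         if segs is not None:
--             pre, post = segs
--             return pre + tail.replace('_', ' ') + post
--     return 'Handles ' + name.replace('_', ' ') + ' operations'
-- ===== Notes on version B (the rewrite author's own statement) =====
-- stated objective: alternative
-- what changed: B partitions the name at its first underscore and does one dict lookup of the first token (keys stored without the underscore), then builds the result by concatenating precomputed (prefix, suffix) text segments around the entity, replacing A's linear startswith-scan over 25 prefixes and its template.format call.
import Mathlib
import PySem

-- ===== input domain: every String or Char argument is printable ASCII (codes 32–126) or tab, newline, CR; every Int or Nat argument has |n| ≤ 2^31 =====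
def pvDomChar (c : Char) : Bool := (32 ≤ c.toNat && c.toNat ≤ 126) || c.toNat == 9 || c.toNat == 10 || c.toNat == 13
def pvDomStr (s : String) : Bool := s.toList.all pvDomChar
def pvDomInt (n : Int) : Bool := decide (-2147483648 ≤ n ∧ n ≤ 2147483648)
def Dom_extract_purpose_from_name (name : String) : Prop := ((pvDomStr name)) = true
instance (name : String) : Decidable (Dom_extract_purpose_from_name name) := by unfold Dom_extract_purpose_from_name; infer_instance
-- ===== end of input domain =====

-- B partitions the name at its first underscore, looks the first token up in a dict keyed
-- without the underscore, and concatenates precomputed (prefix, suffix) segments around the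
-- entity — replacing A's linear startswith-scan and template formatting (alternative; same results).

-- ===== PORT A =====
-- the 'purposes' dict literal of A
def pvPairsA : List (List Char × List Char) :=
  [ ("create_".toList, "Creates a new {}".toList),
    ("update_".toList, "Updates an existing {}".toList),
    ("delete_".toList, "Deletes/removes {}".toList),
    ("get_".toList, "Retrieves {}".toList),
    ("list_".toList, "Lists all {}".toList),
    ("send_".toList, "Sends {}".toList),
    ("add_".toList, "Adds {} to collection".toList),
    ("remove_".toList, "Removes {} from collection".toList),
    ("join_".toList, "Joins {}".toList),
    ("leave_".toList, "Leaves {}".toList),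
    ("accept_".toList, "Accepts {}".toList),
    ("reject_".toList, "Rejects {}".toList),
    ("ban_".toList, "Bans user from {}".toList),
    ("unban_".toList, "Unbans user from {}".toList),
    ("mute_".toList, "Mutes {}".toList),
    ("unmute_".toList, "Unmutes {}".toList),
    ("pin_".toList, "Pins {} for highlighting".toList),
    ("unpin_".toList, "Unpins {}".toList),
    ("save_".toList, "Saves {} to collection".toList),
    ("unsave_".toList, "Removes {} from saved items".toList),
    ("share_".toList, "Shares {} with others".toList),
    ("view_".toList, "Records view activity for {}".toList),
    ("search_".toList, "Searches for {}".toList),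
    ("filter_".toList, "Filters {} by criteria".toList),
    ("my_".toList, "Retrieves current user's {}".toList) ]

def pvPurposesA : PySem.Dict (List Char) (List Char) := PySem.Dict.mk pvPairsA

-- f"Handles {name.replace('_', ' ')} operations"
def pvFallbackA (cs : List Char) : List Char :=
  "Handles ".toList ++ PySem.Chars.replace cs "_".toList " ".toList ++ " operations".toList

-- the 'for prefix, template in purposes.items()' loop; template.format(entity) is the
-- substitution of the single '{}' of the template, i.e. replace (templates contain exactly one '{}')
def pvLoopA (cs : List Char) : List (List Char × List Char) → List Char
  | [] => pvFallbackA cs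
  | (p, t) :: rest =>
    if PySem.Chars.startswith cs p then
      PySem.Chars.replace t "{}".toList
        (PySem.Chars.replace (PySem.List.slice cs (some (PySem.Chars.len p : Int)) none) "_".toList " ".toList)
    else pvLoopA cs rest

def extract_purpose_from_name (name : String) : String :=
  String.ofList (pvLoopA name.toList pvPurposesA.items)

-- ===== PORT B =====
-- the '_SEGMENTS' dict literal of B: first token ↦ (text before the entity, text after it)
def pvSegPairs : List (List Char × (List Char × List Char)) :=
  [ ("create".toList, ("Creates a new ".toList, "".toList)),
    ("update".toList, ("Updates an existing ".toList, "".toList)),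
    ("delete".toList, ("Deletes/removes ".toList, "".toList)),
    ("get".toList, ("Retrieves ".toList, "".toList)),
    ("list".toList, ("Lists all ".toList, "".toList)),
    ("send".toList, ("Sends ".toList, "".toList)),
    ("add".toList, ("Adds ".toList, " to collection".toList)),
    ("remove".toList, ("Removes ".toList, " from collection".toList)),
    ("join".toList, ("Joins ".toList, "".toList)),
    ("leave".toList, ("Leaves ".toList, "".toList)),
    ("accept".toList, ("Accepts ".toList, "".toList)),
    ("reject".toList, ("Rejects ".toList, "".toList)),
    ("ban".toList, ("Bans user from ".toList, "".toList)),
    ("unban".toList, ("Unbans user from ".toList, "".toList)),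
    ("mute".toList, ("Mutes ".toList, "".toList)),
    ("unmute".toList, ("Unmutes ".toList, "".toList)),
    ("pin".toList, ("Pins ".toList, " for highlighting".toList)),
    ("unpin".toList, ("Unpins ".toList, "".toList)),
    ("save".toList, ("Saves ".toList, " to collection".toList)),
    ("unsave".toList, ("Removes ".toList, " from saved items".toList)),
    ("share".toList, ("Shares ".toList, " with others".toList)),
    ("view".toList, ("Records view activity for ".toList, "".toList)),
    ("search".toList, ("Searches for ".toList, "".toList)),
    ("filter".toList, ("Filters ".toList, " by criteria".toList)),
    ("my".toList, ("Retrieves current user's ".toList, "".toList)) ]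

def pvSegments : PySem.Dict (List Char) (List Char × List Char) := PySem.Dict.mk pvSegPairs

-- name.partition('_') ported by hand (exact: head = maximal underscore-free prefix; the
-- separator was found iff head is shorter than the whole string; tail = what follows it)
def extract_purpose_from_name_alt (name : String) : String :=
  let cs := name.toList
  let head := cs.takeWhile (fun c => c != '_')
  if head.length ≠ cs.length then
    match PySem.Dict.get? pvSegments head with
    | some (pre, post) =>
        String.ofList (pre ++ PySem.Chars.replace (cs.drop (head.length + 1)) "_".toList " ".toList ++ post)
    | none =>
        String.ofList ("Handles ".toList ++ PySem.Chars.replace cs "_".toList " ".toList ++ " operations".toList)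
  else
    String.ofList ("Handles ".toList ++ PySem.Chars.replace cs "_".toList " ".toList ++ " operations".toList)

-- ===== PRECONDITION & SPEC =====
def Spec_extract_purpose_from_name (name : String) (out : String) : Prop := out = extract_purpose_from_name_alt name
instance (name : String) (out : String) : Decidable (Spec_extract_purpose_from_name name out) := by unfold Spec_extract_purpose_from_name; infer_instance

-- ===== CLAIM (what is proved, stated in full; the proofs are below) =====
def Claim_equal_extract_purpose_from_name : Prop := ∀ (name : String), Dom_extract_purpose_from_name name → Spec_extract_purpose_from_name name (extract_purpose_from_name name)

-- ===== LEMMAS AND PROOFS =====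

-- A's key/template pairs are exactly B's segment pairs with '_' appended to the key and the
-- value glued around a '{}' hole
def pvGlue (pr : List Char × (List Char × List Char)) : List Char × List Char :=
  (pr.1 ++ ['_'], pr.2.1 ++ "{}".toList ++ pr.2.2)

lemma pvPairsA_eq_map : pvPairsA = pvSegPairs.map pvGlue := by decide

lemma pvSegKeys_no_underscore : ∀ pr ∈ pvSegPairs, '_' ∉ pr.1 := by decide

-- substituting the entity into a glued template is concatenation
lemma pv_format (pr : List Char × (List Char × List Char)) (hpr : pr ∈ pvSegPairs) (e : List Char) :
    PySem.Chars.replace (pr.2.1 ++ "{}".toList ++ pr.2.2) "{}".toList e = pr.2.1 ++ e ++ pr.2.2 := by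
  fin_cases hpr <;> simp [PySem.Chars.replace, PySem.Chars.replace.go]

lemma pv_prefix_iff {w t : List Char} (r : List Char) (hw : '_' ∉ w) (ht : '_' ∉ t) :
    w ++ ['_'] <+: t ++ '_' :: r ↔ w = t := by
  constructor
  · induction w generalizing t with
    | nil =>
      intro h
      cases t with
      | nil => rfl
      | cons c t' =>
        simp only [List.nil_append, List.cons_append, List.cons_prefix_cons] at h
        exact absurd (by simp [← h.1]) ht
    | cons a w' ih =>
      intro h
      cases t with
      | nil =>
        simp only [List.cons_append, List.nil_append, List.cons_prefix_cons] at h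
        exact absurd (by simp [h.1]) hw
      | cons c t' =>
        simp only [List.cons_append, List.cons_prefix_cons] at h
        have hw' : '_' ∉ w' := fun hm => hw (by simp [hm])
        have ht' : '_' ∉ t' := fun hm => ht (by simp [hm])
        have := ih hw' ht' h.2
        simp [h.1, this]
  · rintro rfl
    exact ⟨r, by simp⟩

-- A's scan on a name with no underscore falls through every glued key
lemma pvLoopA_no_underscore (cs : List Char) (ps : List (List Char × (List Char × List Char)))
    (hcs : '_' ∉ cs) (hps : ∀ pr ∈ ps, '_' ∉ pr.1) :
    pvLoopA cs (ps.map pvGlue) = pvFallbackA cs := by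
  induction ps with
  | nil => rfl
  | cons pr rest ih =>
    rw [List.map_cons, show pvGlue pr = (pr.1 ++ ['_'], pr.2.1 ++ "{}".toList ++ pr.2.2) from rfl]
    rw [pvLoopA, if_neg, ih (fun q h => hps q (by simp [h]))]
    intro hsw
    have hpre := (PySem.Chars.startswith_iff _ _).mp hsw
    exact hcs (hpre.subset (by simp))

-- A's scan on t ++ '_' :: r ('_' ∉ t) is a lookup of t in the segment list, glued
lemma pvLoopA_underscore (t r : List Char) (ps : List (List Char × (List Char × List Char)))
    (ht : '_' ∉ t) (hps : ∀ pr ∈ ps, pr ∈ pvSegPairs ∧ '_' ∉ pr.1) :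
    pvLoopA (t ++ '_' :: r) (ps.map pvGlue) =
      (match PySem.Dict.get? (PySem.Dict.mk ps) t with
       | some (pre, post) => pre ++ PySem.Chars.replace r "_".toList " ".toList ++ post
       | none => pvFallbackA (t ++ '_' :: r)) := by
  induction ps with
  | nil => rfl
  | cons pr rest ih =>
    obtain ⟨hmem, hk⟩ := hps pr (by simp)
    rw [List.map_cons, show pvGlue pr = (pr.1 ++ ['_'], pr.2.1 ++ "{}".toList ++ pr.2.2) from rfl]
    rw [pvLoopA, PySem.Dict.get?_mk_cons]
    by_cases hwt : pr.1 = t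
    · rw [if_pos ((PySem.Chars.startswith_iff _ _).mpr ((pv_prefix_iff r (hwt ▸ hk) ht).mpr hwt))]
      rw [if_pos (by simp [hwt])]
      have hlen : (PySem.Chars.len (pr.1 ++ ['_']) : Int) = ((pr.1.length + 1 : Nat) : Int) := by
        simp [PySem.Chars.len_eq]
      rw [hlen, PySem.List.slice_from_natCast]
      have hdrop : (t ++ '_' :: r).drop (pr.1.length + 1) = r := by
        have h1 : t ++ '_' :: r = (t ++ ['_']) ++ r := by simp
        rw [h1, hwt, List.drop_left' (by simp)]
      rw [hdrop, pv_format pr hmem]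
    · rw [if_neg, if_neg (by simp [hwt])]
      · exact ih (fun q h => hps q (by simp [h]))
      · intro hsw
        exact hwt ((pv_prefix_iff r hk ht).mp ((PySem.Chars.startswith_iff _ _).mp hsw))

-- takeWhile decomposition of a list containing '_'
lemma pv_take_split (cs : List Char) (h : '_' ∈ cs) :
    '_' ∉ cs.takeWhile (fun c => c != '_') ∧
    (cs.takeWhile (fun c => c != '_')).length < cs.length ∧
    cs = cs.takeWhile (fun c => c != '_') ++ '_' :: cs.drop ((cs.takeWhile (fun c => c != '_')).length + 1) := by
  induction cs with
  | nil => cases h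
  | cons c cs ih =>
    by_cases hc : c = '_'
    · subst hc
      simp [List.takeWhile]
    · have hmem : '_' ∈ cs := by
        rcases List.mem_cons.mp h with h1 | h1
        · exact absurd h1.symm hc
        · exact h1
      obtain ⟨h1, h2, h3⟩ := ih hmem
      refine ⟨?_, ?_, ?_⟩
      · simp only [List.takeWhile_cons, show (c != '_') = true by simp [hc], if_pos]
        intro hx
        rcases List.mem_cons.mp hx with h4 | h4
        · exact hc h4.symm
        · exact h1 h4
      · simp only [List.takeWhile_cons, show (c != '_') = true by simp [hc], if_pos,
          List.length_cons]
        omega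
      · simp only [List.takeWhile_cons, show (c != '_') = true by simp [hc], if_pos,
          List.length_cons, List.cons_append, List.cons.injEq, true_and]
        conv_lhs => rw [h3]
        rw [List.drop_succ_cons]

lemma pv_take_all (cs : List Char) (h : '_' ∉ cs) :
    cs.takeWhile (fun c => c != '_') = cs := by
  apply List.takeWhile_eq_self_iff.mpr
  intro c hc
  simp only [bne_iff_ne, ne_eq]
  exact fun he => h (he ▸ hc)

-- ===== VERDICT (by name: the statement is the Claim_ definition above) =====
theorem extract_purpose_from_name_spec : Claim_equal_extract_purpose_from_name := by
  intro name _
  unfold Spec_extract_purpose_from_name extract_purpose_from_name extract_purpose_from_name_alt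
  dsimp only
  set cs := name.toList with hcseq
  by_cases hmem : '_' ∈ cs
  · obtain ⟨h1, h2, h3⟩ := pv_take_split cs hmem
    set t := cs.takeWhile (fun c => c != '_') with hteq
    set r := cs.drop (t.length + 1) with hreq
    rw [if_pos (by omega)]
    rw [show pvPurposesA.items = pvSegPairs.map pvGlue from by rw [show pvPurposesA.items = pvPairsA from rfl, pvPairsA_eq_map]]
    conv_lhs => rw [h3]
    rw [pvLoopA_underscore t r pvSegPairs h1 (fun pr h => ⟨h, pvSegKeys_no_underscore pr h⟩)]
    rw [show pvSegments = PySem.Dict.mk pvSegPairs from rfl]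
    cases hget : PySem.Dict.get? (PySem.Dict.mk pvSegPairs) t with
    | none => simp [pvFallbackA, ← h3]
    | some v => obtain ⟨pre, post⟩ := v; rfl
  · have ht := pv_take_all cs hmem
    rw [if_neg (by rw [ht]; simp)]
    rw [show pvPurposesA.items = pvSegPairs.map pvGlue from by rw [show pvPurposesA.items = pvPairsA from rfl, pvPairsA_eq_map]]
    rw [pvLoopA_no_underscore cs pvSegPairs hmem pvSegKeys_no_underscore]
    rfl
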